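-- pv_equiv track=rewrite | github.com/bauyrjanj/leetcode | FB/findMinArray.py | findMinArray
-- ===== SOURCE A (Python) =====
-- def findMinArray(arr, k):
--     if k == 0:
--         return arr
--
--     if arr[k] < arr[0]:
--         arr[k - 1], arr[k] = arr[k], arr[k - 1]
--         k -= 1
--         return findMinArray(arr, k)
--     else:
--         smallest = arr.index(min(arr[k + 1:]))
--         arr[smallest - 1], arr[smallest] = arr[smallest], arr[smallest - 1]
--         smallest -= 1
--         k -= 1
--         return findMinArray(arr, k)
-- ===== SOURCE B (Python) =====
-- def findMinArray(arr, k):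
--     # Iterative bubble-toward-front: each round either shifts arr[k] one step
--     # left, or bubbles the smallest remaining tail value one step left.
--     # Mutates arr in place and returns it.
--     while k != 0:
--         if arr[k] < arr[0]:
--             arr[k - 1], arr[k] = arr[k], arr[k - 1]
--         else:
--             m = arr[k + 1]
--             for i in range(k + 2, len(arr)):
--                 if arr[i] < m:
--                     m = arr[i]
--             j = arr.index(m)
--             arr[j - 1], arr[j] = arr[j], arr[j - 1]
--         k -= 1
--     return arr
-- ===== Notes on version B (the rewrite author's own statement) =====
-- stated objective: alternative
-- what changed: Tail recursion becomes an explicit while-loop, and the else-branch's slice copy + min() call is replaced by a plain running-minimum index scan over the tail; Pre_ excludes only inputs where A raises (negative k, k >= len(arr), or an empty tail min() at k = len(arr)-1).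
import Mathlib
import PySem

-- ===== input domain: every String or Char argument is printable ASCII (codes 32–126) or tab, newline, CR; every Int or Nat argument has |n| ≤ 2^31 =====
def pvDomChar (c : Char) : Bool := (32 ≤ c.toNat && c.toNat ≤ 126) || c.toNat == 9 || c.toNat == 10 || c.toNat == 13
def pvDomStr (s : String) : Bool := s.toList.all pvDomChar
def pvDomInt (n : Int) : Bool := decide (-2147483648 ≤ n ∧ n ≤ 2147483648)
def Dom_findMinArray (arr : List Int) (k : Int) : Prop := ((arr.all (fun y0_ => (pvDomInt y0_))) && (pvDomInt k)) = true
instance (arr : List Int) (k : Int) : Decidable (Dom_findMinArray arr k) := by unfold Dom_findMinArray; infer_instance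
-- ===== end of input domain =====

-- B replaces A's tail recursion by an explicit countdown loop and A's slice+min()
-- by a running-minimum scan over the tail; equal return value on Pre_ (A also
-- mutates its argument in place; only the return value is claimed).


-- ===== PORT A =====
-- Python's tuple swap 'arr[i], arr[j] = arr[j], arr[i]' (RHS read first, then assign i, then j)
def pySwap (a : List Int) (i j : Int) : List Int :=
  PySem.List.pySetD (PySem.List.pySetD a i (PySem.List.pyGetD a j 0)) j (PySem.List.pyGetD a i 0)

-- A's recursion: each call decreases k by exactly 1, so k.toNat fuel is exact for k ≥ 0
-- (k < 0 is outside Pre_: Python A raises there).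
def findMinArrayGo (fuel : Nat) (arr : List Int) (k : Int) : List Int :=
  match fuel with
  | 0 => arr
  | fuel + 1 =>
    if k = 0 then arr
    else if PySem.List.pyGetD arr k 0 < PySem.List.pyGetD arr 0 0 then
      findMinArrayGo fuel (pySwap arr (k - 1) k) (k - 1)
    else
      let m := (PySem.List.min? (PySem.List.slice arr (some (k + 1)) none) (fun x => x)).getD 0
      let smallest : Int := ((PySem.List.index? arr m).getD 0 : Nat)
      findMinArrayGo fuel (pySwap arr (smallest - 1) smallest) (k - 1)

def findMinArray (arr : List Int) (k : Int) : List Int :=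
  findMinArrayGo k.toNat arr k

-- ===== PORT B =====
-- 'm = arr[k+1]; for i in range(k+2, len(arr)): if arr[i] < m: m = arr[i]'
def scanMin (arr : List Int) (k : Int) : Int :=
  (PySem.List.pyRange (k + 2) (arr.length : Int) 1).foldl
    (fun m i => if PySem.List.pyGetD arr i 0 < m then PySem.List.pyGetD arr i 0 else m)
    (PySem.List.pyGetD arr (k + 1) 0)

-- one iteration of the while-loop body, at loop counter j
def stepB (a : List Int) (j : Int) : List Int :=
  if PySem.List.pyGetD a j 0 < PySem.List.pyGetD a 0 0 then
    pySwap a (j - 1) j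
  else
    let m := scanMin a j
    let idx : Int := ((PySem.List.index? a m).getD 0 : Nat)
    pySwap a (idx - 1) idx

def findMinArray_alt (arr : List Int) (k : Int) : List Int :=
  (PySem.List.pyRange k 0 (-1)).foldl stepB arr

-- ===== PRECONDITION & SPEC =====
-- Exactly the inputs on which Python A returns: k = 0, or 1 ≤ k < len(arr) and
-- (first step takes the if-branch, or the tail arr[k+1:] is nonempty); otherwise
-- A raises (IndexError for k ≥ len(arr), RecursionError for k < 0, ValueError
-- from min([]) when k = len(arr)-1 with arr[k] ≥ arr[0]).
def Pre_findMinArray (arr : List Int) (k : Int) : Prop :=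
  k = 0 ∨ (1 ≤ k ∧ k < arr.length ∧
    (PySem.List.pyGetD arr k 0 < PySem.List.pyGetD arr 0 0 ∨ k < (arr.length : Int) - 1))
instance (arr : List Int) (k : Int) : Decidable (Pre_findMinArray arr k) := by
  unfold Pre_findMinArray; infer_instance

def pvWitness_findMinArray : List Int × Int := ([3, 1, 2], 2)

def Spec_findMinArray (arr : List Int) (k : Int) (out : List Int) : Prop := out = findMinArray_alt arr k
instance (arr : List Int) (k : Int) (out : List Int) : Decidable (Spec_findMinArray arr k out) := by unfold Spec_findMinArray; infer_instance

-- ===== CLAIM (what is proved, stated in full; the proofs are below) =====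
def Claim_equal_findMinArray : Prop := ∀ (arr : List Int) (k : Int), Dom_findMinArray arr k → Pre_findMinArray arr k → Spec_findMinArray arr k (findMinArray arr k)

-- ===== LEMMAS AND PROOFS =====

theorem aget_eq (arr : List Int) (p : Int) (h0 : 0 ≤ p) (h1 : p < arr.length) :
    PySem.List.pyGetD arr p 0 = arr[p.toNat]'(by omega) := by
  exact PySem.List.pyGetD_eq_getElem arr 0 h0 (by exact_mod_cast h1)

-- B's running-minimum scan computes min(arr[k+1:]) (value equality; Python's
-- min also returns that value).
theorem scanMin_eq (arr : List Int) (k : Int) (hk : 0 ≤ k) (hlt : k + 1 < (arr.length : Int)) :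
    scanMin arr k =
      (PySem.List.min? (PySem.List.slice arr (some (k + 1)) none) (fun x => x)).getD 0 := by
  have hin : (k + 1).toNat < arr.length := by omega
  have hsl : PySem.List.slice arr (some (k + 1)) none = arr.drop (k + 1).toNat :=
    PySem.List.slice_from arr (by omega)
  have hdrop : arr.drop (k + 1).toNat = arr[(k + 1).toNat] :: arr.drop ((k + 1).toNat + 1) :=
    List.drop_eq_getElem_cons hin
  have hfold : (fun (m i : Int) => if PySem.List.pyGetD arr i 0 < m then PySem.List.pyGetD arr i 0 else m)
      = (fun (m i : Int) => min m (PySem.List.pyGetD arr i 0)) := by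
    funext m i
    rcases lt_or_ge (PySem.List.pyGetD arr i 0) m with h | h <;> simp [min_def] <;> omega
  unfold scanMin
  rw [hfold, PySem.List.foldl_pyRange_pyGetD' arr 0 min (PySem.List.pyGetD arr (k + 1) 0) (by omega : (0:Int) ≤ k + 2)]
  rw [hsl, hdrop, PySem.List.min?_id_cons, Option.getD_some]
  have e : (k + 2).toNat = (k + 1).toNat + 1 := by omega
  rw [e, aget_eq arr (k + 1) (by omega) (by omega)]

theorem go_zero (fuel : Nat) (arr : List Int) : findMinArrayGo fuel arr 0 = arr := by
  cases fuel <;> simp [findMinArrayGo]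

theorem length_pySwap (a : List Int) (i j : Int) : (pySwap a i j).length = a.length := by
  simp [pySwap, PySem.List.length_pySetD]

theorem loop_eq (n : Nat) : ∀ (arr : List Int) (k : Int), k = n → 1 ≤ k → k < arr.length →
    (¬ PySem.List.pyGetD arr k 0 < PySem.List.pyGetD arr 0 0 → k < (arr.length : Int) - 1) →
    findMinArrayGo n arr k = (PySem.List.pyRange k 0 (-1)).foldl stepB arr := by
  induction n with
  | zero => intro arr k hk h1 _ _; omega
  | succ m ih =>
    intro arr k hk h1 h2 h3
    have hk0 : k ≠ 0 := by omega
    rw [PySem.List.pyRange_neg_one_cons (by omega : (0:Int) < k)]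
    simp only [List.foldl_cons]
    by_cases hb : PySem.List.pyGetD arr k 0 < PySem.List.pyGetD arr 0 0
    · have hstep : stepB arr k = pySwap arr (k - 1) k := by simp [stepB, hb]
      rw [hstep]
      show findMinArrayGo (m+1) arr k = _
      rw [findMinArrayGo]
      simp only [hk0, if_false, hb]
      by_cases hk1 : k = 1
      · subst hk1
        simp [go_zero, PySem.List.pyRange_neg_one_eq_nil]
      · exact ih (pySwap arr (k-1) k) (k-1) (by omega) (by omega)
          (by rw [length_pySwap]; omega)
          (by intro _; rw [length_pySwap]; omega)
    · have hlt : k < (arr.length : Int) - 1 := h3 hb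
      set sm : Int := (((PySem.List.index? arr
          ((PySem.List.min? (PySem.List.slice arr (some (k + 1)) none) (fun x => x)).getD 0)).getD 0 : Nat) : Int) with hsm
      have hstep : stepB arr k = pySwap arr (sm - 1) sm := by
        simp only [stepB, hb, if_false]
        rw [scanMin_eq arr k (by omega) (by omega)]
      rw [hstep]
      show findMinArrayGo (m+1) arr k = _
      rw [findMinArrayGo]
      simp only [hk0, if_false, hb]
      by_cases hk1 : k = 1
      · subst hk1
        simp [go_zero, PySem.List.pyRange_neg_one_eq_nil, hsm]
      · exact ih (pySwap arr (sm-1) sm) (k-1) (by omega) (by omega)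
          (by rw [length_pySwap]; omega)
          (by intro _; rw [length_pySwap]; omega)

-- ===== VERDICT (by name: the statement is the Claim_ definition above) =====
theorem findMinArray_spec : Claim_equal_findMinArray := by
  intro arr k _ hpre
  unfold Spec_findMinArray findMinArray findMinArray_alt
  rcases hpre with h0 | ⟨h1, h2, h3⟩
  · subst h0
    simp [go_zero, PySem.List.pyRange_neg_one_eq_nil]
  · rw [loop_eq k.toNat arr k (by omega) h1 h2 (by tauto)]
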